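-- pv_equiv track=rewrite | github.com/r98inver/programmazione1 | script/05 - Codifica/codifica.py | ComputeTable
-- ===== SOURCE A (Python) =====
-- def ComputeTable(s):
-- 	char2int, int2char, count = {}, {}, 0
-- 	for c in s:
-- 		if not c in char2int:
-- 			count += 1
-- 			char2int[c] = count
-- 			int2char[count] = c
-- 	return char2int, int2char
-- ===== SOURCE B (Python) =====
-- def ComputeTable(s):
--     # sort the character set by position of first occurrence, then number the ranks
--     order = sorted(set(s), key=s.find)
--     char2int = {c: i + 1 for i, c in enumerate(order)}
--     int2char = {n: c for c, n in char2int.items()}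
--     return char2int, int2char
-- ===== Notes on version B (the rewrite author's own statement) =====
-- stated objective: alternative
-- what changed: Replaces A's single counter-driven membership loop by a sort-then-rank algorithm: sort the character set by first-occurrence position (s.find), rank the sorted list, and invert the resulting dict.
import Mathlib
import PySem

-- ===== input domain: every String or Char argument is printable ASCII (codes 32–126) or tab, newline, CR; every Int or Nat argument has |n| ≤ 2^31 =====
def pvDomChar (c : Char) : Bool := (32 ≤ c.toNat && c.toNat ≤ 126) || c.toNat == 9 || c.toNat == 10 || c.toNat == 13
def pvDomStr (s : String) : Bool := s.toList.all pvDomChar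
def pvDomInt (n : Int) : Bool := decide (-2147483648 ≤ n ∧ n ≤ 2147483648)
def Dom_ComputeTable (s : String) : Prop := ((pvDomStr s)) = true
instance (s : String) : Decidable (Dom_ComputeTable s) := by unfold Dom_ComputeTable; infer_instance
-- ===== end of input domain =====

-- B replaces A's counter-driven membership loop by a sort-then-rank algorithm: sort the
-- character set by first-occurrence position, rank it, and invert the resulting dict
-- (objective: alternative).

-- ===== PORT A =====
-- the loop body of A: skip an already-seen character, otherwise bump the counter
-- (count = st.2.2; 'count += 1' is inlined as st.2.2 + 1, the same value) and record both directions
def pvStepA (st : PySem.Dict String Int × PySem.Dict Int String × Int) (c : Char) :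
    PySem.Dict String Int × PySem.Dict Int String × Int :=
  if st.1.contains (String.ofList [c]) then st
  else (st.1.insert (String.ofList [c]) (st.2.2 + 1),
        st.2.1.insert (st.2.2 + 1) (String.ofList [c]),
        st.2.2 + 1)

def ComputeTable (s : String) : (List (String × Int)) × (List (Int × String)) :=
  let st := s.toList.foldl pvStepA (PySem.Dict.empty, PySem.Dict.empty, 0)
  (st.1.items, st.2.1.items)

-- ===== PORT B =====
def ComputeTable_alt (s : String) : (List (String × Int)) × (List (Int × String)) :=
  let order := PySem.List.sorted (PySem.Set.ofList s.toList)
    (fun c => PySem.Str.find s (String.ofList [c])) false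
  let char2int : PySem.Dict String Int :=
    PySem.Dict.ofList ((PySem.List.enumerate order 0).map (fun p => (String.ofList [p.2], p.1 + 1)))
  let int2char : PySem.Dict Int String :=
    PySem.Dict.ofList (char2int.items.map (fun p => (p.2, p.1)))
  (char2int.items, int2char.items)

-- ===== PRECONDITION & SPEC =====
def Spec_ComputeTable (s : String) (out : (List (String × Int)) × (List (Int × String))) : Prop := out = ComputeTable_alt s
instance (s : String) (out : (List (String × Int)) × (List (Int × String))) : Decidable (Spec_ComputeTable s out) := by unfold Spec_ComputeTable; infer_instance

-- ===== CLAIM (what is proved, stated in full; the proofs are below) =====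
def Claim_equal_ComputeTable : Prop := ∀ (s : String), Dom_ComputeTable s → Spec_ComputeTable s (ComputeTable s)

-- ===== LEMMAS AND PROOFS =====

-- the state of A's loop after having seen exactly the characters `seen` (in first-occurrence order)
def pvState (seen : List Char) : PySem.Dict String Int × PySem.Dict Int String × Int :=
  (PySem.Dict.ofList ((PySem.List.enumerate seen 1).map (fun p => (String.ofList [p.2], p.1))),
   PySem.Dict.ofList ((PySem.List.enumerate seen 1).map (fun p => (p.1, String.ofList [p.2]))),
   (seen.length : Int))

lemma pv_ofList_singleton_inj (a b : Char) (h : String.ofList [a] = String.ofList [b]) : a = b := by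
  have := congrArg String.toList h; simpa using this

lemma pv_enumerate_append_singleton (xs : List Char) (x : Char) (s : Int) :
    PySem.List.enumerate (xs ++ [x]) s = PySem.List.enumerate xs s ++ [((s + xs.length : Int), x)] := by
  induction xs generalizing s with
  | nil => simp [PySem.List.enumerate_nil, PySem.List.enumerate_cons]
  | cons a t ih => simp [PySem.List.enumerate_cons, ih]; ring

lemma pv_dict_ofList_append {κ ν : Type} [BEq κ] (ps : List (κ × ν)) (p : κ × ν) :
    PySem.Dict.ofList (ps ++ [p]) = (PySem.Dict.ofList ps).insert p.1 p.2 := by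
  simp [PySem.Dict.ofList, PySem.Dict.update]

lemma pv_keys_state (seen : List Char) :
    (pvState seen).1.keys = PySem.Set.ofList (seen.map (fun c => String.ofList [c])) := by
  have h1 : (pvState seen).1 = (PySem.List.enumerate seen 1).foldl
      (fun d p => d.insert (String.ofList [p.2]) p.1) PySem.Dict.empty := by
    simp [pvState, PySem.Dict.ofList, PySem.Dict.update, List.foldl_map]
  rw [h1, PySem.Dict.keys_foldl_insert_key, PySem.Dict.keys_empty, PySem.Set.update_nil_left,
    show (fun p : Int × Char => String.ofList [p.2]) = (fun c : Char => String.ofList [c]) ∘ (·.2) from rfl,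
    ← List.map_map, PySem.List.map_snd_enumerate]

lemma pv_contains_state (seen : List Char) (c : Char) :
    (pvState seen).1.contains (String.ofList [c]) = true ↔ c ∈ seen := by
  rw [PySem.Dict.contains_iff_mem_keys, pv_keys_state, PySem.Set.mem_ofList]
  constructor
  · intro h
    rcases List.mem_map.mp h with ⟨c', hc', he⟩
    rwa [← pv_ofList_singleton_inj c' c he]
  · intro h
    exact List.mem_map.mpr ⟨c, h, rfl⟩

lemma pv_step_state (seen : List Char) (c : Char) :
    pvStepA (pvState seen) c = pvState (PySem.Set.add seen c) := by
  by_cases hc : c ∈ seen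
  · rw [PySem.Set.add_of_mem hc]
    unfold pvStepA
    rw [if_pos ((pv_contains_state seen c).mpr hc)]
  · rw [PySem.Set.add_of_not_mem hc]
    unfold pvStepA
    rw [if_neg (fun h => hc ((pv_contains_state seen c).mp h))]
    simp only [pvState, pv_enumerate_append_singleton, List.map_append, List.map_cons,
      List.map_nil, pv_dict_ofList_append, Prod.mk.injEq]
    refine ⟨?_, ?_, ?_⟩
    · congr 1
      ring
    · congr 1
      ring
    · push_cast [List.length_append, List.length_cons, List.length_nil]
      ring

lemma pv_foldl_state (l : List Char) : ∀ seen : List Char,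
    l.foldl pvStepA (pvState seen) = pvState (PySem.Set.update seen l) := by
  induction l with
  | nil => intro seen; rw [List.foldl_nil, PySem.Set.update_nil]
  | cons c t ih =>
      intro seen
      rw [List.foldl_cons, pv_step_state, ih (PySem.Set.add seen c), PySem.Set.update_cons]

-- [c] is a prefix of t exactly when t starts with c
-- [c] is a prefix of t exactly when t starts with c
lemma pv_singleton_prefix (c : Char) (t : List Char) : [c] <+: t ↔ t[0]? = some c := by
  constructor
  · rintro ⟨r, hr⟩; subst hr; rfl
  · intro h
    cases t with
    | nil => simp at h
    | cons x r =>
        simp at h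
        subst h
        exact ⟨r, rfl⟩

-- s.find(c) for a character occurring in s is its first-occurrence index
lemma pv_find_single (l : List Char) (c : Char) (h : c ∈ l) :
    PySem.Chars.find l [c] = (l.idxOf c : Int) := by
  have hinf : [c] <:+: l := by
    rcases List.mem_iff_append.mp h with ⟨s1, s2, hs⟩
    exact ⟨s1, s2, by simp [hs]⟩
  have hnn : 0 ≤ PySem.Chars.find l [c] := (PySem.Chars.find_nonneg_iff l [c]).mpr hinf
  obtain ⟨hpre, hmin⟩ := PySem.Chars.find_spec hnn
  set n := (PySem.Chars.find l [c]).toNat with hn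
  have hgn : l[n]? = some c := by
    have := (pv_singleton_prefix c (l.drop n)).mp hpre
    simpa [List.getElem?_drop] using this
  have hlt : n < l.length := (List.getElem?_eq_some_iff.mp hgn).1
  have hc : l[n]'hlt = c := (List.getElem?_eq_some_iff.mp hgn).2
  have hltI : l.idxOf c < l.length := List.idxOf_lt_length_of_mem h
  have hidx : [c] <+: l.drop (l.idxOf c) := by
    rw [pv_singleton_prefix]
    simp [List.getElem?_drop, List.getElem?_eq_getElem hltI, List.getElem_idxOf hltI]
  have h1 : n ≤ l.idxOf c := le_of_not_gt (fun hgt => hmin _ hgt hidx)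
  have h2 : l.idxOf c ≤ n := by
    have hmem : c ∈ l.take (n + 1) := by
      have hn' : n < (l.take (n + 1)).length := by simp [hlt]
      have hg : (l.take (n + 1))[n]'hn' = c := by simpa [List.getElem_take] using hc
      exact hg ▸ (l.take (n + 1)).getElem_mem hn'
    have := (List.mem_take_iff_idxOf_lt h).mp hmem
    omega
  have : n = l.idxOf c := le_antisymm h1 h2
  omega

-- along set(s) (first-occurrence order) the first-occurrence indices strictly increase
lemma pv_idxOf_pairwise (l : List Char) :
    (PySem.Set.ofList l).Pairwise (fun a b => l.idxOf a < l.idxOf b) := by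
  induction l using List.reverseRecOn with
  | nil => simp [PySem.Set.ofList_nil]
  | append_singleton t x ih =>
      rw [PySem.Set.ofList_append_singleton]
      by_cases hx : x ∈ PySem.Set.ofList t
      · rw [PySem.Set.add_of_mem hx]
        refine ih.imp_of_mem (fun {a b} ha hb hab => ?_)
        have ha' : a ∈ t := (PySem.Set.mem_ofList _ _).mp ha
        have hb' : b ∈ t := (PySem.Set.mem_ofList _ _).mp hb
        rwa [List.idxOf_append_of_mem ha', List.idxOf_append_of_mem hb']
      · rw [PySem.Set.add_of_not_mem hx]
        have hx' : x ∉ t := fun h => hx ((PySem.Set.mem_ofList _ _).mpr h)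
        rw [List.pairwise_append]
        refine ⟨ih.imp_of_mem (fun {a b} ha hb hab => ?_), by simp, ?_⟩
        · have ha' : a ∈ t := (PySem.Set.mem_ofList _ _).mp ha
          have hb' : b ∈ t := (PySem.Set.mem_ofList _ _).mp hb
          rwa [List.idxOf_append_of_mem ha', List.idxOf_append_of_mem hb']
        · intro a ha b hb
          simp only [List.mem_singleton] at hb
          subst hb
          have ha' : a ∈ t := (PySem.Set.mem_ofList _ _).mp ha
          rw [List.idxOf_append_of_mem ha', List.idxOf_append_of_notMem hx']
          have := List.idxOf_lt_length_of_mem ha'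
          simp [List.idxOf_cons_self]
          omega

-- sorted(set(s), key=s.find) is exactly the first-occurrence dedup of s
lemma pv_sorted_eq_dedup (l : List Char) :
    PySem.List.sorted (PySem.Set.ofList l) (fun c => PySem.Chars.find l [c]) false
      = PySem.List.dedup l := by
  rw [PySem.List.dedup_eq_ofList]
  apply PySem.List.sorted_eq_of_perm_of_pairwise_lt
  · exact List.Perm.refl _
  · refine (pv_idxOf_pairwise l).imp_of_mem (fun {a b} ha hb hab => ?_)
    have ha' : a ∈ l := (PySem.Set.mem_ofList _ _).mp ha
    have hb' : b ∈ l := (PySem.Set.mem_ofList _ _).mp hb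
    rw [pv_find_single l a ha', pv_find_single l b hb']
    exact_mod_cast hab

-- shifting enumerate's start by one
lemma pv_enumerate_shift (xs : List Char) (s : Int) :
    PySem.List.enumerate xs (s + 1) = (PySem.List.enumerate xs s).map (fun p => (p.1 + 1, p.2)) := by
  induction xs generalizing s with
  | nil => simp [PySem.List.enumerate_nil]
  | cons a t ih => simp [PySem.List.enumerate_cons, ih]

-- a dict built from a pair list with distinct keys lists exactly those pairs
lemma pv_items_ofList {κ ν : Type} [BEq κ] [LawfulBEq κ] (ps : List (κ × ν))
    (h : (ps.map (·.1)).Nodup) : (PySem.Dict.ofList ps).items = ps := by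
  induction ps using List.reverseRecOn with
  | nil => rfl
  | append_singleton t p ih =>
      have h2 : ((t.map (·.1)) ++ [p.1]).Nodup := by simpa using h
      have ht : (t.map (·.1)).Nodup := h2.of_append_left
      have hpk : p.1 ∉ t.map (·.1) :=
        fun hmem => (List.disjoint_of_nodup_append h2) hmem (by simp)
      have hkeys : (PySem.Dict.ofList t).keys = t.map (·.1) := by
        have hfold : PySem.Dict.ofList t
            = t.foldl (fun d q => d.insert q.1 q.2) PySem.Dict.empty := by
          simp [PySem.Dict.ofList, PySem.Dict.update]
        rw [hfold,
          show (fun (d : PySem.Dict κ ν) (q : κ × ν) => d.insert q.1 q.2)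
            = (fun d q => d.insert ((·.1) q) ((fun q : κ × ν => q.2) q)) from rfl,
          PySem.Dict.keys_foldl_insert_key, PySem.Dict.keys_empty, PySem.Set.update_nil_left]
        exact PySem.Set.ofList_eq_self_of_nodup _ ht
      have hnc : (PySem.Dict.ofList t).contains p.1 = false := by
        cases hc : (PySem.Dict.ofList t).contains p.1 with
        | false => rfl
        | true =>
            have hk := (PySem.Dict.contains_iff_mem_keys _ _).mp hc
            rw [hkeys] at hk
            exact absurd hk hpk
      rw [pv_dict_ofList_append, PySem.Dict.items_insert, hnc]
      simp [ih ht]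

lemma pv_keys_L1 (seen : List Char) :
    ((PySem.List.enumerate seen 1).map (fun p => (String.ofList [p.2], p.1))).map (·.1)
      = seen.map (fun c => String.ofList [c]) := by
  rw [List.map_map,
    show ((·.1) ∘ (fun p : Int × Char => (String.ofList [p.2], p.1)))
      = (fun c : Char => String.ofList [c]) ∘ (·.2) from rfl,
    ← List.map_map, PySem.List.map_snd_enumerate]

-- ===== VERDICT (by name: the statement is the Claim_ definition above) =====
theorem ComputeTable_spec : Claim_equal_ComputeTable := by
  intro s _
  show ComputeTable s = ComputeTable_alt s
  have hkey : (fun c => PySem.Str.find s (String.ofList [c]))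
      = (fun c => PySem.Chars.find s.toList [c]) := by
    funext c; simp
  simp only [ComputeTable, ComputeTable_alt]
  rw [hkey, pv_sorted_eq_dedup, PySem.List.dedup_eq_ofList]
  have hsh : PySem.List.enumerate (PySem.Set.ofList s.toList) 1
      = (PySem.List.enumerate (PySem.Set.ofList s.toList) 0).map (fun p => (p.1 + 1, p.2)) := by
    simpa using pv_enumerate_shift (PySem.Set.ofList s.toList) 0
  have hL : ((PySem.List.enumerate (PySem.Set.ofList s.toList) 0).map
        (fun p => (String.ofList [p.2], p.1 + 1)))
      = (PySem.List.enumerate (PySem.Set.ofList s.toList) 1).map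
        (fun p => (String.ofList [p.2], p.1)) := by
    rw [hsh, List.map_map]
    rfl
  have hnodup : (((PySem.List.enumerate (PySem.Set.ofList s.toList) 1).map
        (fun p => (String.ofList [p.2], p.1))).map (·.1)).Nodup := by
    rw [pv_keys_L1]
    exact (PySem.Set.nodup_ofList s.toList).map
      (fun a b hab => pv_ofList_singleton_inj a b hab)
  have hitems := pv_items_ofList _ hnodup
  rw [hL, hitems]
  rw [show (((PySem.List.enumerate (PySem.Set.ofList s.toList) 1).map
        (fun p => (String.ofList [p.2], p.1))).map (fun p => (p.2, p.1)))
      = (PySem.List.enumerate (PySem.Set.ofList s.toList) 1).map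
        (fun p => (p.1, String.ofList [p.2])) from by rw [List.map_map]; rfl]
  rw [show ((PySem.Dict.empty, PySem.Dict.empty, (0 : Int)) :
        PySem.Dict String Int × PySem.Dict Int String × Int) = pvState [] from rfl,
    pv_foldl_state s.toList [], PySem.Set.update_nil_left]
  simp only [pvState]
  rw [hitems]
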